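-- pv_equiv track=rewrite | github.com/marin-community/marin | experiments/domain_phase_mix/exploratory/two_phase_many/dsre_ceq_debug/make_dsre_ceq_debug_plots.py | _group_boundaries
-- ===== SOURCE A (Python) =====
-- def _domain_sort_key(domain_name: str) -> tuple[int, str, int]:
--     if domain_name.startswith("dolma3_cc/"):
--         tail = domain_name.removeprefix("dolma3_cc/")
--         if tail.endswith("_high"):
--             return (0, tail.removesuffix("_high"), 0)
--         if tail.endswith("_low"):
--             return (0, tail.removesuffix("_low"), 1)
--         return (0, tail, 2)
--     if domain_name.startswith("dolma3_"):
--         return (1, domain_name.removeprefix("dolma3_"), 0)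
--     if domain_name.startswith("dolmino_"):
--         return (2, domain_name.removeprefix("dolmino_"), 0)
--     return (3, domain_name, 0)
--
-- def _group_boundaries(domain_names: list[str]) -> list[int]:
--     boundaries: list[int] = []
--     prev_group: tuple[int, str] | None = None
--     for idx, domain_name in enumerate(domain_names):
--         key = _domain_sort_key(domain_name)
--         group = (key[0], key[1])
--         if prev_group is not None and group != prev_group:
--             boundaries.append(idx)
--         prev_group = group
--     return boundaries
-- ===== SOURCE B (Python) =====
-- def _domain_sort_key(domain_name: str) -> tuple[int, str, int]:
--     if domain_name.startswith("dolma3_cc/"):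
--         tail = domain_name.removeprefix("dolma3_cc/")
--         if tail.endswith("_high"):
--             return (0, tail.removesuffix("_high"), 0)
--         if tail.endswith("_low"):
--             return (0, tail.removesuffix("_low"), 1)
--         return (0, tail, 2)
--     if domain_name.startswith("dolma3_"):
--         return (1, domain_name.removeprefix("dolma3_"), 0)
--     if domain_name.startswith("dolmino_"):
--         return (2, domain_name.removeprefix("dolmino_"), 0)
--     return (3, domain_name, 0)
--
-- def _run_lengths(keys):
--     # run-length encode: for each maximal run of equal keys, its length
--     lengths = []
--     i = 0
--     while i < len(keys):
--         j = i + 1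
--         while j < len(keys) and keys[j] == keys[i]:
--             j += 1
--         lengths.append(j - i)
--         i = j
--     return lengths
--
-- def _group_boundaries(domain_names: list[str]) -> list[int]:
--     keys = [_domain_sort_key(d)[:2] for d in domain_names]
--     boundaries: list[int] = []
--     offset = 0
--     for n in _run_lengths(keys)[:-1]:
--         offset += n
--         boundaries.append(offset)
--     return boundaries
-- ===== Notes on version B (the rewrite author's own statement) =====
-- stated objective: alternative
-- what changed: B run-length-encodes the list of group keys and emits the cumulative sums of all but the last run length, instead of A's element-by-element comparison with the previous group during one enumerated pass.
import Mathlib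
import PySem

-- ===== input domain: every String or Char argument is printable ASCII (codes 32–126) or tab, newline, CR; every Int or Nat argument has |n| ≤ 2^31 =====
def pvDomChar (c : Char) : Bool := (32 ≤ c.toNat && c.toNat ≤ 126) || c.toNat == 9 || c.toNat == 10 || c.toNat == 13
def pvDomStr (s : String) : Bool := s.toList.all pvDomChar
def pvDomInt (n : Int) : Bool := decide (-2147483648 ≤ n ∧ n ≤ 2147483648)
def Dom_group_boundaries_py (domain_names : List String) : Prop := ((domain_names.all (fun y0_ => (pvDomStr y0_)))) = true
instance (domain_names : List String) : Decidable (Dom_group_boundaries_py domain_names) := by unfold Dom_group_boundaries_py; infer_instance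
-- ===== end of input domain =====

-- B replaces A's compare-with-previous enumerated pass by run-length encoding the
-- group keys and accumulating run lengths into boundary indices (objective: alternative decomposition).

-- ===== PORT A =====
-- shared helper _domain_sort_key (identical in both Pythons).
-- removeprefix/removesuffix are ported as drop/take on the char list: exact here because
-- each is applied only after the corresponding startswith/endswith check succeeded.
def domainSortKey (domain_name : String) : Int × String × Int :=
  let s := domain_name.toList
  if PySem.Chars.startswith s ("dolma3_cc/".toList) then
    let tail := s.drop ("dolma3_cc/".toList.length)
    if PySem.Chars.endswith tail ("_high".toList) then
      (0, String.ofList (tail.take (tail.length - ("_high".toList.length))), 0)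
    else if PySem.Chars.endswith tail ("_low".toList) then
      (0, String.ofList (tail.take (tail.length - ("_low".toList.length))), 1)
    else
      (0, String.ofList tail, 2)
  else if PySem.Chars.startswith s ("dolma3_".toList) then
    (1, String.ofList (s.drop ("dolma3_".toList.length)), 0)
  else if PySem.Chars.startswith s ("dolmino_".toList) then
    (2, String.ofList (s.drop ("dolmino_".toList.length)), 0)
  else
    (3, domain_name, 0)

def group_boundaries_py (domain_names : List String) : List Int :=
  ((PySem.List.enumerate domain_names 0).foldl
    (fun (st : List Int × Option (Int × String)) (p : Int × String) =>
      let key := domainSortKey p.2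
      let group := (key.1, key.2.1)
      let boundaries :=
        match st.2 with
        | some prev => if group ≠ prev then st.1 ++ [p.1] else st.1
        | none => st.1
      (boundaries, some group))
    ([], none)).1

-- ===== PORT B =====
-- _run_lengths: length of the leading run of equal keys, then recurse on the remainder
def runLengths {α : Type} [DecidableEq α] : List α → List Nat
  | [] => []
  | k :: rest =>
      (1 + (rest.takeWhile (fun x => x = k)).length) ::
        runLengths (rest.dropWhile (fun x => x = k))
  termination_by l => l.length
  decreasing_by
    exact Nat.lt_succ_of_le (List.length_dropWhile_le _ _)

def group_boundaries_py_alt (domain_names : List String) : List Int :=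
  let keys := domain_names.map (fun d =>
    let k := domainSortKey d
    (k.1, k.2.1))
  ((runLengths keys).dropLast.foldl
    (fun (st : Int × List Int) (n : Nat) =>
      (st.1 + (n : Int), st.2 ++ [st.1 + (n : Int)]))
    (0, [])).2

-- ===== PRECONDITION & SPEC =====
def Spec_group_boundaries_py (domain_names : List String) (out : List Int) : Prop := out = group_boundaries_py_alt domain_names
instance (domain_names : List String) (out : List Int) : Decidable (Spec_group_boundaries_py domain_names out) := by unfold Spec_group_boundaries_py; infer_instance

-- ===== CLAIM (what is proved, stated in full; the proofs are below) =====
def Claim_equal_group_boundaries_py : Prop := ∀ (domain_names : List String), Dom_group_boundaries_py domain_names → Spec_group_boundaries_py domain_names (group_boundaries_py domain_names)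

-- ===== LEMMAS AND PROOFS =====

-- the group key of one name
def pvGroup (d : String) : Int × String :=
  ((domainSortKey d).1, (domainSortKey d).2.1)

-- reference recursion: boundaries emitted by A's loop from index i with previous group prev
def pvSpec (i : Int) (prev : Int × String) : List (Int × String) → List Int
  | [] => []
  | k :: t => (if k ≠ prev then [i] else []) ++ pvSpec (i + 1) k t

-- reference recursion for B's accumulation loop
def pvBfl (off : Int) : List Nat → List Int
  | [] => []
  | n :: rest => (off + (n : Int)) :: pvBfl (off + (n : Int)) rest

theorem pvRunLengths_cons {α : Type} [DecidableEq α] (k : α) (rest : List α) :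
    runLengths (k :: rest) =
      (1 + (rest.takeWhile (fun x => x = k)).length) ::
        runLengths (rest.dropWhile (fun x => x = k)) := by
  rw [runLengths]

theorem pvA_fold (t : List String) : ∀ (i : Int) (acc : List Int) (g : Int × String),
    ((PySem.List.enumerate t i).foldl
      (fun (st : List Int × Option (Int × String)) (p : Int × String) =>
        let key := domainSortKey p.2
        let group := (key.1, key.2.1)
        let boundaries :=
          match st.2 with
          | some prev => if group ≠ prev then st.1 ++ [p.1] else st.1
          | none => st.1
        (boundaries, some group))
      (acc, some g)).1 = acc ++ pvSpec i g (t.map pvGroup) := by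
  induction t with
  | nil => intro i acc g; simp [PySem.List.enumerate_nil, pvSpec]
  | cons x t ih =>
      intro i acc g
      rw [PySem.List.enumerate_cons]
      simp only [List.foldl_cons, List.map_cons, pvSpec]
      by_cases h : pvGroup x = g
      · show ((PySem.List.enumerate t (i+1)).foldl _ ((if ((domainSortKey x).1, (domainSortKey x).2.1) ≠ g then acc ++ [i] else acc), some ((domainSortKey x).1, (domainSortKey x).2.1))).1 = _
        have h' : ¬ (((domainSortKey x).1, (domainSortKey x).2.1) ≠ g) := by
          simpa [pvGroup] using h
        rw [if_neg h', ih]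
        simp only [pvGroup] at h ⊢
        simp [h]
      · show ((PySem.List.enumerate t (i+1)).foldl _ ((if ((domainSortKey x).1, (domainSortKey x).2.1) ≠ g then acc ++ [i] else acc), some ((domainSortKey x).1, (domainSortKey x).2.1))).1 = _
        have h' : ((domainSortKey x).1, (domainSortKey x).2.1) ≠ g := by
          simpa [pvGroup] using h
        rw [if_pos h', ih]
        have : pvGroup x ≠ g := h
        simp [pvGroup, h', List.append_assoc]

theorem pvSpec_const (s : List (Int × String)) (k : Int × String)
    (hs : ∀ x ∈ s, x = k) : ∀ (i : Int) (r : List (Int × String)),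
    pvSpec i k (s ++ r) = pvSpec (i + s.length) k r := by
  induction s with
  | nil => intro i r; simp
  | cons a s ih =>
      intro i r
      have ha : a = k := hs a (by simp)
      simp only [List.cons_append, pvSpec, ha]
      rw [ih (fun x hx => hs x (by simp [hx]))]
      simp only [ne_eq, not_true_eq_false, if_false, List.nil_append, List.length_cons]
      congr 1
      push_cast
      ring

theorem pvBfold (lens : List Nat) : ∀ (off : Int) (acc : List Int),
    (lens.foldl
      (fun (st : Int × List Int) (n : Nat) =>
        (st.1 + (n : Int), st.2 ++ [st.1 + (n : Int)]))
      (off, acc)).2 = acc ++ pvBfl off lens := by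
  induction lens with
  | nil => intro off acc; simp [pvBfl]
  | cons n rest ih =>
      intro off acc
      simp only [List.foldl_cons, pvBfl]
      rw [ih]
      simp

theorem pvDropWhile_head {α : Type} [DecidableEq α] :
    ∀ (t : List α) (k r : α) (t' : List α),
      t.dropWhile (fun x => decide (x = k)) = r :: t' → r ≠ k := by
  intro t
  induction t with
  | nil => intro k r t' h; simp [List.dropWhile] at h
  | cons a t ih =>
      intro k r t' h
      by_cases hak : a = k
      · rw [List.dropWhile_cons_of_pos (by simp [hak])] at h
        exact ih k r t' h
      · rw [List.dropWhile_cons_of_neg (by simp [hak])] at h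
        cases h
        exact hak

theorem pvTakeWhile_mem {α : Type} [DecidableEq α] (t : List α) (k : α) :
    ∀ x ∈ t.takeWhile (fun x => decide (x = k)), x = k := by
  intro x hx
  simpa using List.mem_takeWhile_imp (l := t) (p := fun y => decide (y = k)) hx

theorem pvMain (n : Nat) : ∀ (t : List (Int × String)), t.length ≤ n →
    ∀ (k : Int × String) (off : Int),
    pvSpec (off + 1) k t = pvBfl off ((runLengths (k :: t)).dropLast) := by
  induction n with
  | zero =>
      intro t ht k off
      have : t = [] := List.length_eq_zero_iff.mp (Nat.le_zero.mp ht)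
      subst this
      rw [pvRunLengths_cons]
      have h0 : runLengths ([] : List (Int × String)) = [] := by rw [runLengths]
      simp only [List.takeWhile_nil, List.dropWhile_nil]
      rw [h0]
      rfl
  | succ n ih =>
      intro t ht k off
      rw [pvRunLengths_cons]
      have hsplit : t.takeWhile (fun x => decide (x = k)) ++ t.dropWhile (fun x => decide (x = k)) = t :=
        List.takeWhile_append_dropWhile
      rcases hd : t.dropWhile (fun x => decide (x = k)) with _ | ⟨r, t'⟩
      · -- single run: no boundary
        rw [hd] at hsplit
        simp only [List.append_nil] at hsplit
        have h0 : runLengths ([] : List (Int × String)) = [] := by rw [runLengths]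
        rw [h0]
        show pvSpec (off + 1) k t = []
        conv_lhs => rw [← hsplit]
        have := pvSpec_const (t.takeWhile (fun x => decide (x = k))) k
          (pvTakeWhile_mem t k) (off + 1) []
        simpa [pvSpec] using this
      · -- a next group starts at r
        rw [hd] at hsplit
        have hr : r ≠ k := pvDropWhile_head t k r t' hd
        have hne : runLengths (r :: t') ≠ [] := by rw [pvRunLengths_cons]; simp
        rw [List.dropLast_cons_of_ne_nil hne]
        simp only [pvBfl]
        have hlen : t'.length ≤ n := by
          have h1 := congrArg List.length hsplit
          simp at h1
          omega
        have hih := ih t' hlen r (off + ((1 + (t.takeWhile (fun x => decide (x = k))).length : Nat) : Int))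
        conv_lhs => rw [← hsplit]
        rw [pvSpec_const (t.takeWhile (fun x => decide (x = k))) k (pvTakeWhile_mem t k) (off + 1) (r :: t')]
        have hstep : pvSpec (off + 1 + ((t.takeWhile (fun x => decide (x = k))).length : Int)) k (r :: t')
            = (off + 1 + ((t.takeWhile (fun x => decide (x = k))).length : Int)) ::
              pvSpec (off + 1 + ((t.takeWhile (fun x => decide (x = k))).length : Int) + 1) r t' := by
          simp [pvSpec, hr]
        rw [hstep]
        have harith : off + 1 + ((t.takeWhile (fun x => decide (x = k))).length : Int)
            = off + ((1 + (t.takeWhile (fun x => decide (x = k))).length : Nat) : Int) := by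
          push_cast; ring
        rw [harith, hih]

-- ===== VERDICT (by name: the statement is the Claim_ definition above) =====
theorem group_boundaries_py_spec : Claim_equal_group_boundaries_py := by
  intro names _
  unfold Spec_group_boundaries_py group_boundaries_py group_boundaries_py_alt
  cases names with
  | nil => simp [PySem.List.enumerate_nil, runLengths]
  | cons d ds =>
      rw [PySem.List.enumerate_cons]
      simp only [List.foldl_cons, List.map_cons]
      have hm : (fun d => ((domainSortKey d).1, (domainSortKey d).2.1)) = pvGroup := rfl
      refine Eq.trans (pvA_fold ds (0 + 1) [] (pvGroup d)) ?_
      rw [pvBfold]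
      simp only [List.nil_append]
      have := pvMain (ds.map pvGroup).length (ds.map pvGroup) le_rfl (pvGroup d) 0
      simpa [pvGroup] using this
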